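-- pv_equiv track=rewrite | github.com/isega24/Metaheuristica | Practica/GRASP-QAP.py | ordenSuma
-- ===== SOURCE A (Python) =====
-- def ordenSuma(matriz):
--     orden = []
--     for i in range(len(matriz)):
--         potencial = 0
--         for j in range(len(matriz)):
--             potencial+=matriz[i][j] + matriz[j][i]
--         orden.append((i,potencial))
--     return orden
-- ===== SOURCE B (Python) =====
-- def ordenSuma(matriz):
--     n = len(matriz)
--     tot = [0] * n
--     for i in range(n):
--         row = matriz[i]
--         for j in range(n):
--             v = row[j]
--             tot[i] += v
--             tot[j] += v
--     return [(i, tot[i]) for i in range(n)]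
-- ===== Notes on version B (the rewrite author's own statement) =====
-- stated objective: alternative
-- what changed: Replaces A's gather (for each i, re-scan the matrix summing matriz[i][j]+matriz[j][i], reading every entry twice) with a single scatter pass that reads each entry of the leading n x n block once and adds it to both accumulator cells tot[i] and tot[j], then emits the accumulator table.
import Mathlib
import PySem

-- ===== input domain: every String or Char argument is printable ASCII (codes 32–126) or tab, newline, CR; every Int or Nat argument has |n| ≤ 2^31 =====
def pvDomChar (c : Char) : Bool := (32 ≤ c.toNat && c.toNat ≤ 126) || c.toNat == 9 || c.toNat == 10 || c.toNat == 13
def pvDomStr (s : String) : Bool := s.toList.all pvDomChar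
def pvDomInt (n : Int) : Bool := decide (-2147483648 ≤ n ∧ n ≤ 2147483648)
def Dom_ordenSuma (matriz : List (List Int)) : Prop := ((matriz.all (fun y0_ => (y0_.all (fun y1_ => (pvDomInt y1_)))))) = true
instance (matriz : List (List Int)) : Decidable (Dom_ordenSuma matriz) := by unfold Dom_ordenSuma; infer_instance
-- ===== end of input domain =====

-- B replaces A's gather (each output cell re-scans the matrix, reading every entry twice)
-- with one scatter pass: each entry of the leading n×n block is read once and added to both
-- accumulator cells tot[i] and tot[j]. Same O(n^2) cost; return value only, no mutation.

-- ===== PORT A =====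
def ordenSuma (matriz : List (List Int)) : List (Int × Int) :=
  (PySem.List.pyRange 0 matriz.length 1).foldl
    (fun orden i =>
      orden ++ [(i,
        (PySem.List.pyRange 0 matriz.length 1).foldl
          (fun pot j =>
            pot + (PySem.List.pyGetD (PySem.List.pyGetD matriz i []) j 0
                   + PySem.List.pyGetD (PySem.List.pyGetD matriz j []) i 0))
          0)])
    []

-- ===== PORT B =====
-- 'tot[k] += v' for a list of ints; in Source B the index k is always a nonnegative
-- in-range loop index, so 'set k.toNat' is exact Python semantics here.
def bump (t : List Int) (k : Int) (v : Int) : List Int :=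
  t.set k.toNat (t.getD k.toNat 0 + v)

def ordenSuma_alt (matriz : List (List Int)) : List (Int × Int) :=
  let n : Int := matriz.length
  let tot : List Int :=
    (PySem.List.pyRange 0 n 1).foldl
      (fun tot i =>
        let row := PySem.List.pyGetD matriz i []
        (PySem.List.pyRange 0 n 1).foldl
          (fun tot j =>
            let v := PySem.List.pyGetD row j 0
            bump (bump tot i v) j v)
          tot)
      (List.replicate matriz.length 0)
  (PySem.List.pyRange 0 n 1).map (fun i => (i, PySem.List.pyGetD tot i 0))

-- ===== PRECONDITION & SPEC =====
-- Pre_ excludes only inputs where the Python A raises IndexError: some row of matriz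
-- shorter than len(matriz) (B's Python raises on exactly the same inputs).
def Pre_ordenSuma (matriz : List (List Int)) : Prop :=
  ∀ row ∈ matriz, matriz.length ≤ row.length
instance (matriz : List (List Int)) : Decidable (Pre_ordenSuma matriz) := by
  unfold Pre_ordenSuma; infer_instance
def pvWitness_ordenSuma : List (List Int) := [[1, 2], [3, 4]]
def Spec_ordenSuma (matriz : List (List Int)) (out : List (Int × Int)) : Prop := out = ordenSuma_alt matriz
instance (matriz : List (List Int)) (out : List (Int × Int)) : Decidable (Spec_ordenSuma matriz out) := by unfold Spec_ordenSuma; infer_instance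

-- ===== CLAIM (what is proved, stated in full; the proofs are below) =====
def Claim_equal_ordenSuma : Prop := ∀ (matriz : List (List Int)), Dom_ordenSuma matriz → Pre_ordenSuma matriz → Spec_ordenSuma matriz (ordenSuma matriz)

-- ===== LEMMAS AND PROOFS =====

theorem bump_length (t : List Int) (a v : Int) : (bump t a v).length = t.length := by
  simp [bump]

theorem bump_getD (t : List Int) (a v : Int) (k : Nat) :
    (bump t a v).getD k 0
      = t.getD k 0 + (if a.toNat = k ∧ k < t.length then v else 0) := by
  simp only [bump, List.getD_eq_getElem?_getD, List.getElem?_set]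
  by_cases h1 : a.toNat = k
  · subst h1
    by_cases h2 : a.toNat < t.length
    · simp [h2]
    · simp [h2]
  · simp [h1]

-- pointwise effect of the inner scatter loop over a duplicate-free list of
-- nonnegative indices
theorem scatter_getD (f : Int → Int) (i : Int) :
    ∀ (L : List Int) (t : List Int) (k : Nat), (∀ j ∈ L, 0 ≤ j) → L.Nodup →
      (L.foldl (fun t j => bump (bump t i (f j)) j (f j)) t).getD k 0
        = t.getD k 0 + (if k = i.toNat ∧ k < t.length then (L.map f).sum else 0)
          + (if (k : Int) ∈ L ∧ k < t.length then f k else 0) := by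
  intro L
  induction L with
  | nil => intro t k _ _; simp
  | cons j L' ih =>
    intro t k hpos hnd
    have hj : 0 ≤ j := hpos j (by simp)
    have hnd' : L'.Nodup := hnd.of_cons
    have hjL' : j ∉ L' := by simp_all [List.nodup_cons]
    simp only [List.foldl_cons]
    rw [ih _ k (fun x hx => hpos x (by simp [hx])) hnd']
    rw [bump_length, bump_length, bump_getD, bump_getD, bump_length]
    by_cases hlen : k < t.length
    · simp only [hlen, and_true, List.map_cons, List.sum_cons, List.mem_cons]
      by_cases hA : k = i.toNat
      · by_cases hB : j = (k : Int)
        · have hC : (k : Int) ∉ L' := hB ▸ hjL'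
          rw [if_pos hA.symm, if_pos (show j.toNat = k by omega), if_pos hA,
              if_pos hA, if_neg hC, if_pos (Or.inl hB.symm), ← hB]
          ring
        · rw [if_pos hA.symm, if_neg (show ¬ j.toNat = k by omega), if_pos hA, if_pos hA]
          by_cases hC : (k : Int) ∈ L'
          · rw [if_pos hC, if_pos (Or.inr hC)]; ring
          · rw [if_neg hC, if_neg (by rintro (h | h); exact hB h.symm; exact hC h)]
            ring
      · by_cases hB : j = (k : Int)
        · have hC : (k : Int) ∉ L' := hB ▸ hjL'
          rw [if_neg (fun h => hA h.symm), if_pos (show j.toNat = k by omega),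
              if_neg hA, if_neg hA, if_neg hC, if_pos (Or.inl hB.symm), ← hB]
          ring
        · rw [if_neg (fun h => hA h.symm), if_neg (show ¬ j.toNat = k by omega),
              if_neg hA, if_neg hA]
          by_cases hC : (k : Int) ∈ L'
          · rw [if_pos hC, if_pos (Or.inr hC)]; ring
          · rw [if_neg hC, if_neg (by rintro (h | h); exact hB h.symm; exact hC h)]
            ring
    · simp [hlen]

-- the scatter loop never changes the accumulator's length
theorem scatter_length (f : Int → Int) (i : Int) :
    ∀ (L : List Int) (t : List Int),
      (L.foldl (fun t j => bump (bump t i (f j)) j (f j)) t).length = t.length := by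
  intro L
  induction L with
  | nil => intro t; rfl
  | cons x xs ih => intro t; simp only [List.foldl_cons]; rw [ih, bump_length, bump_length]

-- a fold whose every step adds a per-iteration constant to cell k and preserves length
theorem foldl_getD_add (g : List Int → Int → List Int) (c : Int → Int)
    (nn k : Nat) :
    ∀ (L : List Int) (t : List Int), t.length = nn →
      (∀ t' i, i ∈ L → t'.length = nn →
        (g t' i).length = nn ∧ (g t' i).getD k 0 = t'.getD k 0 + c i) →
      (L.foldl g t).getD k 0 = t.getD k 0 + (L.map c).sum := by
  intro L
  induction L with
  | nil => intro t _ _; simp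
  | cons x L' ih =>
    intro t ht hg
    have hx := hg t x (by simp) ht
    simp only [List.foldl_cons, List.map_cons, List.sum_cons]
    rw [ih (g t x) hx.1 (fun t' i hi h => hg t' i (by simp [hi]) h), hx.2]
    ring

theorem sum_ite_range_zero (S : Int → Int) (k : Nat) :
    ∀ nn : Nat, nn ≤ k →
      ((List.range nn).map (fun m : Nat => if k = m then S m else 0)).sum = 0 := by
  intro nn
  induction nn with
  | zero => intro _; simp
  | succ n ih =>
    intro h
    rw [List.range_succ]
    simp only [List.map_append, List.sum_append, List.map_cons, List.map_nil]
    rw [ih (by omega)]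
    have : ¬ (k = n) := by omega
    simp [this]

theorem sum_ite_range (S : Int → Int) (k : Nat) :
    ∀ nn : Nat, k < nn →
      ((List.range nn).map (fun m : Nat => if k = m then S m else 0)).sum = S k := by
  intro nn
  induction nn with
  | zero => omega
  | succ n ih =>
    intro h
    rw [List.range_succ]
    simp only [List.map_append, List.sum_append, List.map_cons, List.map_nil]
    by_cases hk : k = n
    · subst hk
      rw [sum_ite_range_zero S k k (le_refl _)]
      simp
    · rw [ih (by omega)]
      simp [hk]

theorem sum_split (l : List Int) (f g : Int → Int) :
    l.foldl (fun s j => s + (f j + g j)) 0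
      = (l.map f).sum + (l.map g).sum := by
  rw [PySem.List.foldl_add]
  have : (l.map fun j => f j + g j).sum = (l.map f).sum + (l.map g).sum := by
    induction l with
    | nil => rfl
    | cons x xs ihx => simp only [List.map_cons, List.sum_cons, ihx]; ring
  omega

theorem sum_map_add_split (l : List Int) (f g : Int → Int) :
    (l.map (fun x => f x + g x)).sum = (l.map f).sum + (l.map g).sum := by
  induction l with
  | nil => rfl
  | cons x xs ih => simp only [List.map_cons, List.sum_cons, ih]; ring

-- final accumulator cell k holds row-sum k plus column-sum k
theorem tot_char (matriz : List (List Int)) (k : Nat) (hk : k < matriz.length) :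
    (((PySem.List.pyRange 0 (matriz.length : Int) 1).foldl
        (fun tot i =>
          (PySem.List.pyRange 0 (matriz.length : Int) 1).foldl
            (fun tot j =>
              bump (bump tot i (PySem.List.pyGetD (PySem.List.pyGetD matriz i []) j 0)) j
                (PySem.List.pyGetD (PySem.List.pyGetD matriz i []) j 0))
            tot)
        (List.replicate matriz.length 0)).getD k 0)
      = ((PySem.List.pyRange 0 (matriz.length : Int) 1).map
          (fun j => PySem.List.pyGetD (PySem.List.pyGetD matriz (k : Int) []) j 0)).sum
        + ((PySem.List.pyRange 0 (matriz.length : Int) 1).map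
            (fun j => PySem.List.pyGetD (PySem.List.pyGetD matriz j []) (k : Int) 0)).sum := by
  set nn := matriz.length with hnn
  set R := PySem.List.pyRange 0 (nn : Int) 1 with hR
  have hposR : ∀ j ∈ R, 0 ≤ j := by
    intro j hj; rw [hR, PySem.List.mem_pyRange_one] at hj; exact hj.1
  have hndR : R.Nodup := PySem.List.nodup_pyRange_one 0 (nn : Int)
  have hkR : (k : Int) ∈ R := by
    rw [hR, PySem.List.mem_pyRange_one]
    constructor
    · positivity
    · exact_mod_cast hk
  rw [foldl_getD_add _
        (fun i => (if k = i.toNat then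
            (R.map (fun j => PySem.List.pyGetD (PySem.List.pyGetD matriz i []) j 0)).sum
          else 0) + PySem.List.pyGetD (PySem.List.pyGetD matriz i []) (k : Int) 0)
        nn k R (List.replicate nn 0) (by simp)]
  · rw [show (List.replicate nn (0:Int)).getD k 0 = 0 from by
        simp [List.getD_eq_getElem?_getD, hk], zero_add]
    rw [sum_map_add_split R _ _]
    congr 1
    · rw [hR, PySem.List.pyRange_one]
      simp only [List.map_map, Int.sub_zero, Int.toNat_natCast, Function.comp_def, zero_add,
        Int.toNat_natCast]
      exact sum_ite_range
        (fun x : Int =>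
          ((List.range nn).map
            (fun m : Nat => PySem.List.pyGetD (PySem.List.pyGetD matriz x []) (m : Int) 0)).sum)
        k nn hk
  · intro t' i hi ht'
    constructor
    · rw [scatter_length]; exact ht'
    · rw [scatter_getD _ _ R t' k hposR hndR, ht']
      simp only [hk, and_true, hkR, if_true]
      by_cases hik : k = i.toNat
      · rw [if_pos hik]; ring
      · rw [if_neg hik]; ring

-- ===== VERDICT (by name: the statement is the Claim_ definition above) =====
theorem ordenSuma_spec : Claim_equal_ordenSuma := by
  intro m _ _
  unfold Spec_ordenSuma ordenSuma ordenSuma_alt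
  rw [PySem.List.foldl_append_singleton_eq_map]
  simp only [List.nil_append]
  apply List.map_congr_left
  intro i hi
  rw [PySem.List.mem_pyRange_one] at hi
  have h0i : 0 ≤ i := hi.1
  have hkn : i.toNat < m.length := by omega
  have hcast : ((i.toNat : Nat) : Int) = i := Int.toNat_of_nonneg h0i
  have hpg : ∀ xs : List Int, PySem.List.pyGetD xs i 0 = xs.getD i.toNat 0 := by
    intro xs
    conv_lhs => rw [← hcast]
    rw [PySem.List.pyGetD_natCast]
  refine Prod.ext rfl ?_
  show _ = PySem.List.pyGetD _ i 0
  rw [hpg, tot_char m i.toNat hkn, hcast]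
  exact sum_split _ _ _
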